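-- pv_equiv track=rewrite | github.com/mypbstyle87/Algorithm | day13/day13_01.py | solution
-- ===== SOURCE A (Python) =====
-- def solution(answers):
--     count1, count2, count3 = 0, 0, 0
--     temp1 = [2, 1, 2, 3, 2, 4, 2, 5]
--     temp2 = [3, 3, 1, 1, 2, 2, 4, 4, 5, 5]
--     answer = []
--     # 정답 비교 후 각 count에 누적
--     for i in range(1, len(answers) + 1):
--         # 그냥 가독성을 위해서 temp1, temp2, temp3에 패턴을 전부 저장할껄
--         if (i % 5 if i % 5 else 5) == answers[i - 1]: # 괜히 컴프리헨션 사용해보겠다고 복잡하게 만든듯..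
--             count1 += 1
--         if temp1[i % 8 - 1] == answers[i - 1]:
--             count2 += 1
--         if temp2[i % 10 - 1] == answers[i - 1]:
--             count3 += 1
--     temp3 = [count1, count2, count3]
--     return [j+1 for j in range(3) if max(temp3)==temp3[j]]
-- ===== SOURCE B (Python) =====
-- def solution(answers):
--     # Histogram approach: one pass builds a frequency table of (position mod 40, answer)
--     # (40 = lcm of the three pattern periods 5, 8, 10); each score is then read off the
--     # 40-entry table, so no per-element comparisons against the patterns are made.
--     patterns = [[1, 2, 3, 4, 5], [2, 1, 2, 3, 2, 4, 2, 5], [3, 3, 1, 1, 2, 2, 4, 4, 5, 5]]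
--     freq = {}
--     for k, a in enumerate(answers):
--         key = (k % 40, a)
--         freq[key] = freq.get(key, 0) + 1
--     scores = [sum(freq.get((r, p[r % len(p)]), 0) for r in range(40)) for p in patterns]
--     best = max(scores)
--     return [i + 1 for i in range(3) if scores[i] == best]
-- ===== Notes on version B (the rewrite author's own statement) =====
-- stated objective: alternative
-- what changed: Replaced A's fused loop of three per-element pattern comparisons with modular indexing by a histogram algorithm: one pass builds a frequency table keyed by (index mod 40, answer) (40 = lcm of the pattern periods), and each pattern's score is read off the 40-entry table with no per-element comparisons; then the max scorers are listed.
import Mathlib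
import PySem

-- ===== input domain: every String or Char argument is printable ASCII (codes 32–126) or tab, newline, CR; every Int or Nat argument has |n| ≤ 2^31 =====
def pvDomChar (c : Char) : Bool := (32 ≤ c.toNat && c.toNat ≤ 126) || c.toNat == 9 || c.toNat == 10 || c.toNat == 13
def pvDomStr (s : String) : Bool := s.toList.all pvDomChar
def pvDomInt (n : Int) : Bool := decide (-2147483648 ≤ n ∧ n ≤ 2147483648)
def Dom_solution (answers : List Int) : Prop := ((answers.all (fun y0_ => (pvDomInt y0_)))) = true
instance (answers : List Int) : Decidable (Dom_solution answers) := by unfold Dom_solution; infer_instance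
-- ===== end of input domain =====

-- B replaces A's fused loop of per-element pattern comparisons by a histogram algorithm:
-- one pass builds a frequency table keyed by (index mod 40, answer) (40 = lcm of the
-- pattern periods 5, 8, 10), and each score is read off the 40-entry table; objective: alternative.

-- ===== PORT A =====
-- Literal port of A. Indices into `answers` are i-1 for i in range(1, len+1), always in
-- range, and temp1[i%8-1] / temp2[i%10-1] use Python's negative-index wraparound, which
-- PySem.List.pyGetD implements; the default value is never returned.
def solution (answers : List Int) : List Int :=
  let temp1 : List Int := [2, 1, 2, 3, 2, 4, 2, 5]
  let temp2 : List Int := [3, 3, 1, 1, 2, 2, 4, 4, 5, 5]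
  let cs :=
    (PySem.List.pyRange 1 ((answers.length : Int) + 1) 1).foldl
      (fun (c : Int × Int × Int) i =>
        let c1 := if (if PySem.Int.mod i 5 ≠ 0 then PySem.Int.mod i 5 else 5)
                     = PySem.List.pyGetD answers (i - 1) 0 then c.1 + 1 else c.1
        let c2 := if PySem.List.pyGetD temp1 (PySem.Int.mod i 8 - 1) 0
                     = PySem.List.pyGetD answers (i - 1) 0 then c.2.1 + 1 else c.2.1
        let c3 := if PySem.List.pyGetD temp2 (PySem.Int.mod i 10 - 1) 0
                     = PySem.List.pyGetD answers (i - 1) 0 then c.2.2 + 1 else c.2.2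
        (c1, c2, c3))
      (0, 0, 0)
  let temp3 : List Int := [cs.1, cs.2.1, cs.2.2]
  (PySem.List.pyRange 0 3 1).foldl
    (fun acc j => if (PySem.List.max? temp3 (fun x => x)).getD 0 = PySem.List.pyGetD temp3 j 0
                  then acc ++ [j + 1] else acc) []

-- ===== PORT B =====
-- Literal port of Source B: the freq dict is PySem.Dict keyed by (k % 40, a); freq[key] =
-- freq.get(key, 0) + 1 is Dict.insert with Dict.getD; scores are read off the table.
def solution_alt (answers : List Int) : List Int :=
  let patterns : List (List Int) :=
    [[1, 2, 3, 4, 5], [2, 1, 2, 3, 2, 4, 2, 5], [3, 3, 1, 1, 2, 2, 4, 4, 5, 5]]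
  let freq : PySem.Dict (Int × Int) Int :=
    (PySem.List.enumerate answers 0).foldl
      (fun d ka =>
        let key := (PySem.Int.mod ka.1 40, ka.2)
        d.insert key (d.getD key 0 + 1))
      PySem.Dict.empty
  let scores : List Int := patterns.map (fun p =>
    ((PySem.List.pyRange 0 40 1).map (fun r =>
        freq.getD (r, PySem.List.pyGetD p (PySem.Int.mod r (p.length : Int)) 0) 0)).sum)
  let best := (PySem.List.max? scores (fun x => x)).getD 0
  (PySem.List.pyRange 0 3 1).foldl
    (fun acc i => if PySem.List.pyGetD scores i 0 = best then acc ++ [i + 1] else acc) []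

-- ===== PRECONDITION & SPEC =====
def Spec_solution (answers : List Int) (out : List Int) : Prop := out = solution_alt answers
instance (answers : List Int) (out : List Int) : Decidable (Spec_solution answers out) := by unfold Spec_solution; infer_instance

-- ===== CLAIM (what is proved, stated in full; the proofs are below) =====
def Claim_equal_solution : Prop := ∀ (answers : List Int), Dom_solution answers → Spec_solution answers (solution answers)

-- ===== LEMMAS AND PROOFS =====

theorem enum_gen (answers : List Int) : ∀ (s : Int),
    PySem.List.enumerate answers s =
      (List.range answers.length).map (fun (k : Nat) => (s + (k : Int), answers.getD k 0)) := by
  induction answers with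
  | nil => intro s; simp [PySem.List.enumerate]
  | cons x t ih =>
    intro s
    rw [PySem.List.enumerate_cons, ih (s+1)]
    simp [List.range_succ_eq_map, List.map_map, Function.comp]
    intro a _; ring

theorem enumerate_zero_eq_range (answers : List Int) :
    PySem.List.enumerate answers 0 =
      (List.range answers.length).map (fun (k : Nat) => ((k : Int), answers.getD k 0)) := by
  rw [enum_gen answers 0]; simp

theorem cond1_eq (k : Nat) :
    (if PySem.Int.mod (1 + (k : Int)) 5 ≠ 0 then PySem.Int.mod (1 + (k : Int)) 5 else (5 : Int))
      = PySem.List.pyGetD [1, 2, 3, 4, 5] (PySem.Int.mod (k : Int) 5) 0 := by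
  have h1 : PySem.Int.mod (1 + (k:Int)) 5 = (((1+k) % 5 : Nat) : Int) := by
    exact_mod_cast PySem.Int.mod_natCast (1+k) 5
  have h2 : PySem.Int.mod (k:Int) 5 = ((k % 5 : Nat) : Int) := by
    exact_mod_cast PySem.Int.mod_natCast k 5
  rw [h1, h2]
  have hlt : k % 5 < 5 := Nat.mod_lt _ (by norm_num)
  rw [show (1+k) % 5 = (1 + k % 5) % 5 by omega]
  set r := k % 5 with hr
  clear_value r
  interval_cases r <;> decide

theorem cond2_eq (k : Nat) :
    PySem.List.pyGetD ([2, 1, 2, 3, 2, 4, 2, 5] : List Int) (PySem.Int.mod (1 + (k : Int)) 8 - 1) 0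
      = PySem.List.pyGetD ([2, 1, 2, 3, 2, 4, 2, 5] : List Int) (PySem.Int.mod (k : Int) 8) 0 := by
  have h1 : PySem.Int.mod (1 + (k:Int)) 8 = (((1+k) % 8 : Nat) : Int) := by
    exact_mod_cast PySem.Int.mod_natCast (1+k) 8
  have h2 : PySem.Int.mod (k:Int) 8 = ((k % 8 : Nat) : Int) := by
    exact_mod_cast PySem.Int.mod_natCast k 8
  rw [h1, h2]
  have hlt : k % 8 < 8 := Nat.mod_lt _ (by norm_num)
  rw [show (1+k) % 8 = (1 + k % 8) % 8 by omega]
  set r := k % 8 with hr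
  clear_value r
  interval_cases r <;> decide

theorem cond3_eq (k : Nat) :
    PySem.List.pyGetD ([3, 3, 1, 1, 2, 2, 4, 4, 5, 5] : List Int) (PySem.Int.mod (1 + (k : Int)) 10 - 1) 0
      = PySem.List.pyGetD ([3, 3, 1, 1, 2, 2, 4, 4, 5, 5] : List Int) (PySem.Int.mod (k : Int) 10) 0 := by
  have h1 : PySem.Int.mod (1 + (k:Int)) 10 = (((1+k) % 10 : Nat) : Int) := by
    exact_mod_cast PySem.Int.mod_natCast (1+k) 10
  have h2 : PySem.Int.mod (k:Int) 10 = ((k % 10 : Nat) : Int) := by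
    exact_mod_cast PySem.Int.mod_natCast k 10
  rw [h1, h2]
  have hlt : k % 10 < 10 := Nat.mod_lt _ (by norm_num)
  rw [show (1+k) % 10 = (1 + k % 10) % 10 by omega]
  set r := k % 10 with hr
  clear_value r
  interval_cases r <;> decide

theorem fold_triple_eq_sums (P1 P2 P3 : Nat → Prop) [DecidablePred P1] [DecidablePred P2] [DecidablePred P3]
    (l : List Nat) : ∀ (c1 c2 c3 : Int),
    l.foldl (fun (c : Int × Int × Int) k =>
        (if P1 k then c.1 + 1 else c.1,
         if P2 k then c.2.1 + 1 else c.2.1,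
         if P3 k then c.2.2 + 1 else c.2.2)) (c1, c2, c3)
      = (c1 + (l.map (fun k => if P1 k then (1 : Int) else 0)).sum,
         c2 + (l.map (fun k => if P2 k then (1 : Int) else 0)).sum,
         c3 + (l.map (fun k => if P3 k then (1 : Int) else 0)).sum) := by
  induction l with
  | nil => intro c1 c2 c3; simp
  | cons x t ih =>
    intro c1 c2 c3
    simp only [List.foldl_cons, List.map_cons, List.sum_cons, ih]
    split_ifs <;> simp <;> ring_nf <;> trivial

theorem ite_eq_comm_int {α : Type} (a b : Int) (u v : α) :
    (if a = b then u else v) = (if b = a then u else v) := by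
  by_cases h : a = b
  · simp [h]
  · simp [h, Ne.symm h]

theorem counts_eq (answers : List Int) :
    List.foldl
      (fun (x : Int × Int × Int) (y : Nat) =>
        (if (if PySem.Int.mod (1 + ↑y) 5 ≠ 0 then PySem.Int.mod (1 + ↑y) 5 else 5) =
              PySem.List.pyGetD answers (1 + ↑y - 1) 0 then x.1 + 1 else x.1,
         if PySem.List.pyGetD [2, 1, 2, 3, 2, 4, 2, 5] (PySem.Int.mod (1 + ↑y) 8 - 1) 0 =
              PySem.List.pyGetD answers (1 + ↑y - 1) 0 then x.2.1 + 1 else x.2.1,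
         if PySem.List.pyGetD [3, 3, 1, 1, 2, 2, 4, 4, 5, 5] (PySem.Int.mod (1 + ↑y) 10 - 1) 0 =
              PySem.List.pyGetD answers (1 + ↑y - 1) 0 then x.2.2 + 1 else x.2.2))
      (0, 0, 0) (List.range answers.length)
    = (((List.range answers.length).map (fun (k : Nat) =>
          if answers.getD k 0 = PySem.List.pyGetD [1, 2, 3, 4, 5] (PySem.Int.mod ↑k 5) 0
          then (1 : Int) else 0)).sum,
       ((List.range answers.length).map (fun (k : Nat) =>
          if answers.getD k 0 = PySem.List.pyGetD [2, 1, 2, 3, 2, 4, 2, 5] (PySem.Int.mod ↑k 8) 0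
          then (1 : Int) else 0)).sum,
       ((List.range answers.length).map (fun (k : Nat) =>
          if answers.getD k 0 = PySem.List.pyGetD [3, 3, 1, 1, 2, 2, 4, 4, 5, 5] (PySem.Int.mod ↑k 10) 0
          then (1 : Int) else 0)).sum) := by
  rw [PySem.List.foldl_congr_mem (List.range answers.length) _
    (fun (c : Int × Int × Int) (k : Nat) =>
      (if answers.getD k 0 = PySem.List.pyGetD [1, 2, 3, 4, 5] (PySem.Int.mod ↑k 5) 0 then c.1 + 1 else c.1,
       if answers.getD k 0 = PySem.List.pyGetD [2, 1, 2, 3, 2, 4, 2, 5] (PySem.Int.mod ↑k 8) 0 then c.2.1 + 1 else c.2.1,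
       if answers.getD k 0 = PySem.List.pyGetD [3, 3, 1, 1, 2, 2, 4, 4, 5, 5] (PySem.Int.mod ↑k 10) 0 then c.2.2 + 1 else c.2.2))
    (0, 0, 0) ?_]
  · rw [fold_triple_eq_sums]
    simp
  · intro acc x _
    rw [show (1 + (x : Int) - 1) = (x : Int) from by ring]
    rw [PySem.List.pyGetD_natCast, cond1_eq, cond2_eq, cond3_eq]
    simp only [Prod.mk.injEq]
    exact ⟨ite_eq_comm_int _ _ _ _, ite_eq_comm_int _ _ _ _, ite_eq_comm_int _ _ _ _⟩

theorem final_comm (l r : List Int) :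
    r.foldl (fun acc j => if (PySem.List.max? l (fun x => x)).getD 0 = PySem.List.pyGetD l j 0
                          then acc ++ [j + 1] else acc) []
    = r.foldl (fun acc i => if PySem.List.pyGetD l i 0 = (PySem.List.max? l (fun x => x)).getD 0
                          then acc ++ [i + 1] else acc) [] := by
  apply PySem.List.foldl_congr_mem
  intro acc x _
  rw [ite_eq_comm_int]

-- one element's contribution: a pair q matches (r, f r) for exactly one r of a nodup list
theorem ind_sum (f : Int → Int) (q : Int × Int) :
    ∀ (R : List Int), R.Nodup →
    (R.map (fun r => if q = (r, f r) then (1 : Int) else 0)).sum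
      = if q.1 ∈ R ∧ q.2 = f q.1 then 1 else 0 := by
  intro R
  induction R with
  | nil => intro _; simp
  | cons r R ih =>
    intro hnd
    rcases List.nodup_cons.mp hnd with ⟨hrR, hnd'⟩
    simp only [List.map_cons, List.sum_cons, ih hnd']
    obtain ⟨q1, q2⟩ := q
    by_cases h1 : q1 = r
    · subst h1
      by_cases h2 : q2 = f q1
      · simp [h2, hrR]
      · simp [h2, Prod.ext_iff]
    · simp [Prod.ext_iff, h1, Ne.symm]

theorem count_sum (f : Int → Int) (R : List Int) (hR : R.Nodup) :
    ∀ (l : List (Int × Int)),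
    (R.map (fun r => ((List.count (r, f r) l : Nat) : Int))).sum
      = (l.countP (fun q => decide (q.1 ∈ R) && decide (q.2 = f q.1)) : Int) := by
  intro l
  induction l with
  | nil => simp
  | cons q l ih =>
    have hstep : ∀ r : Int,
        ((List.count (r, f r) (q :: l) : Nat) : Int)
          = ((List.count (r, f r) l : Nat) : Int) + (if q = (r, f r) then 1 else 0) := by
      intro r
      rw [List.count_cons]
      by_cases h : q = (r, f r) <;> simp [h]
    rw [List.map_congr_left (fun r _ => hstep r), PySem.List.sum_map_add_int, ih,
        ind_sum f q R hR]
    rw [List.countP_cons]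
    by_cases hm : q.1 ∈ R ∧ q.2 = f q.1
    · simp [hm.1, hm.2]
    · have : ¬ (decide (q.1 ∈ R) && decide (q.2 = f q.1)) = true := by
        simpa [Decidable.not_and_iff_not_or_not] using hm
      simp [hm, this]

theorem pyRange40_nodup : (PySem.List.pyRange 0 40 1).Nodup := by decide

-- per-pattern score: reading the (k % 40, answer) histogram at the 40 pattern entries
-- equals the direct comparison count, for any pattern whose length divides 40
theorem score_eq (answers : List Int) (p : List Int)
    (hd : p.length ∣ 40) :
    ((PySem.List.pyRange 0 40 1).map (fun r =>
        (PySem.Dict.counter ((List.range answers.length).map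
            (fun (k : Nat) => (PySem.Int.mod (k : Int) 40, answers.getD k 0)))).getD
          (r, PySem.List.pyGetD p (PySem.Int.mod r (p.length : Int)) 0) 0)).sum
    = ((List.range answers.length).map (fun (k : Nat) =>
          if answers.getD k 0 = PySem.List.pyGetD p (PySem.Int.mod (k : Int) (p.length : Int)) 0
          then (1 : Int) else 0)).sum := by
  simp only [PySem.Dict.getD_counter]
  rw [count_sum (fun r => PySem.List.pyGetD p (PySem.Int.mod r (p.length : Int)) 0)
        (PySem.List.pyRange 0 40 1) pyRange40_nodup]
  rw [List.countP_map]
  have hmem : ∀ (k : Nat), (PySem.Int.mod (k : Int) 40) ∈ PySem.List.pyRange 0 40 1 := by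
    intro k
    rw [PySem.List.mem_pyRange_one]
    exact ⟨PySem.Int.mod_nonneg _ (by norm_num), PySem.Int.mod_lt _ (by norm_num)⟩
  have hidx : ∀ (k : Nat),
      PySem.List.pyGetD p (PySem.Int.mod (PySem.Int.mod (k : Int) 40) (p.length : Int)) 0
        = PySem.List.pyGetD p (PySem.Int.mod (k : Int) (p.length : Int)) 0 := by
    intro k
    have h40 : PySem.Int.mod (k : Int) 40 = ((k % 40 : Nat) : Int) := by
      exact_mod_cast PySem.Int.mod_natCast k 40
    have h2 : PySem.Int.mod (((k % 40 : Nat)) : Int) (p.length : Int)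
        = ((k % 40 % p.length : Nat) : Int) := by
      exact_mod_cast PySem.Int.mod_natCast (k % 40) p.length
    have h3 : PySem.Int.mod (k : Int) (p.length : Int) = ((k % p.length : Nat) : Int) := by
      exact_mod_cast PySem.Int.mod_natCast k p.length
    rw [h40, h2, h3, Nat.mod_mod_of_dvd k hd]
  have hcong : ∀ (k : Nat),
      ((fun q : Int × Int => decide (q.1 ∈ PySem.List.pyRange 0 40 1)
          && decide (q.2 = PySem.List.pyGetD p (PySem.Int.mod q.1 (p.length : Int)) 0)) ∘
        (fun (k : Nat) => (PySem.Int.mod (k : Int) 40, answers.getD k 0))) k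
      = decide (answers.getD k 0
          = PySem.List.pyGetD p (PySem.Int.mod (k : Int) (p.length : Int)) 0) := by
    intro k
    simp only [Function.comp_apply, hmem k, decide_true, Bool.true_and, hidx k]
  rw [List.countP_congr (fun k _ => by rw [hcong k])]
  rw [← PySem.List.sum_map_ite_one_zero
        (fun (k : Nat) => decide (answers.getD k 0
          = PySem.List.pyGetD p (PySem.Int.mod (k : Int) (p.length : Int)) 0))
        (List.range answers.length)]
  simp

-- the frequency-building fold over enumerate(answers) IS the counter of the key list
theorem freq_eq_counter (answers : List Int) :
    (PySem.List.enumerate answers 0).foldl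
      (fun (d : PySem.Dict (Int × Int) Int) ka =>
        d.insert (PySem.Int.mod ka.1 40, ka.2)
          (d.getD (PySem.Int.mod ka.1 40, ka.2) 0 + 1))
      PySem.Dict.empty
    = PySem.Dict.counter ((List.range answers.length).map
        (fun (k : Nat) => (PySem.Int.mod (k : Int) 40, answers.getD k 0))) := by
  rw [show ((List.range answers.length).map
        (fun (k : Nat) => (PySem.Int.mod (k : Int) 40, answers.getD k 0)))
      = (PySem.List.enumerate answers 0).map
          (fun ka : Int × Int => (PySem.Int.mod ka.1 40, ka.2)) from by
    rw [enumerate_zero_eq_range, List.map_map]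
    rfl]
  rw [← PySem.Dict.foldl_insert_getD_add_one_eq_counter, List.foldl_map]

theorem score_eq1 (answers : List Int) :
    ((PySem.List.pyRange 0 40 1).map (fun r =>
        (PySem.Dict.counter ((List.range answers.length).map
            (fun (k : Nat) => (PySem.Int.mod (k : Int) 40, answers.getD k 0)))).getD
          (r, PySem.List.pyGetD [1, 2, 3, 4, 5] (PySem.Int.mod r 5) 0) 0)).sum
    = ((List.range answers.length).map (fun (k : Nat) =>
          if answers.getD k 0 = PySem.List.pyGetD [1, 2, 3, 4, 5] (PySem.Int.mod (k : Int) 5) 0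
          then (1 : Int) else 0)).sum := by
  simpa using score_eq answers [1, 2, 3, 4, 5] (by decide)

theorem score_eq2 (answers : List Int) :
    ((PySem.List.pyRange 0 40 1).map (fun r =>
        (PySem.Dict.counter ((List.range answers.length).map
            (fun (k : Nat) => (PySem.Int.mod (k : Int) 40, answers.getD k 0)))).getD
          (r, PySem.List.pyGetD [2, 1, 2, 3, 2, 4, 2, 5] (PySem.Int.mod r 8) 0) 0)).sum
    = ((List.range answers.length).map (fun (k : Nat) =>
          if answers.getD k 0 = PySem.List.pyGetD [2, 1, 2, 3, 2, 4, 2, 5] (PySem.Int.mod (k : Int) 8) 0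
          then (1 : Int) else 0)).sum := by
  simpa using score_eq answers [2, 1, 2, 3, 2, 4, 2, 5] (by decide)

theorem score_eq3 (answers : List Int) :
    ((PySem.List.pyRange 0 40 1).map (fun r =>
        (PySem.Dict.counter ((List.range answers.length).map
            (fun (k : Nat) => (PySem.Int.mod (k : Int) 40, answers.getD k 0)))).getD
          (r, PySem.List.pyGetD [3, 3, 1, 1, 2, 2, 4, 4, 5, 5] (PySem.Int.mod r 10) 0) 0)).sum
    = ((List.range answers.length).map (fun (k : Nat) =>
          if answers.getD k 0 = PySem.List.pyGetD [3, 3, 1, 1, 2, 2, 4, 4, 5, 5] (PySem.Int.mod (k : Int) 10) 0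
          then (1 : Int) else 0)).sum := by
  simpa using score_eq answers [3, 3, 1, 1, 2, 2, 4, 4, 5, 5] (by decide)

-- ===== VERDICT (by name: the statement is the Claim_ definition above) =====
theorem solution_spec : Claim_equal_solution := by
  intro answers _
  unfold Spec_solution solution solution_alt
  simp only [freq_eq_counter]
  rw [PySem.List.pyRange_one 1 ((answers.length : Int) + 1)]
  rw [show ((answers.length : Int) + 1 - 1).toNat = answers.length from by omega]
  rw [List.foldl_map]
  simp only [List.map_cons, List.map_nil, List.length_cons, List.length_nil, Nat.reduceAdd, Nat.cast_ofNat]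
  rw [counts_eq answers, final_comm]
  simp only [score_eq1, score_eq2, score_eq3]
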